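-- pv_equiv track=rewrite | github.com/apri30th/pai | src/job-exporter/src/job_exporter.py | parse_from_labels
-- ===== SOURCE A (Python) =====
-- def parse_from_labels(labels):
--     gpu_ids = []
--     other_labels = {}
--
--     for key, val in labels.items():
--         if "container_label_GPU_ID" == key:
--             s2 = val.replace("\"", "").split(",")
--             for id in s2:
--                 if id:
--                     gpu_ids.append(id)
--         else:
--             other_labels[key] = val
--
--     return gpu_ids, other_labels
-- ===== SOURCE B (Python) =====
-- def parse_from_labels(labels):
--     def tokens(s):
--         out, buf = [], []
--         for ch in s:
--             if ch == '"':
--                 continue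
--             if ch == ',':
--                 if buf:
--                     out.append(''.join(buf))
--                 buf = []
--             else:
--                 buf.append(ch)
--         if buf:
--             out.append(''.join(buf))
--         return out
--
--     gpu_ids = [t for key, val in labels.items()
--                if key == "container_label_GPU_ID" for t in tokens(val)]
--     other_labels = {key: val for key, val in labels.items()
--                     if key != "container_label_GPU_ID"}
--     return gpu_ids, other_labels
-- ===== Notes on version B (the rewrite author's own statement) =====
-- stated objective: alternative
-- what changed: B replaces A's single imperative pass (per-value replace+split+filter and a dict built by per-key inserts) with two declarative comprehension passes over the items plus a hand-written one-pass character-scan tokenizer with an explicit buffer for the GPU values.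
import Mathlib
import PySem

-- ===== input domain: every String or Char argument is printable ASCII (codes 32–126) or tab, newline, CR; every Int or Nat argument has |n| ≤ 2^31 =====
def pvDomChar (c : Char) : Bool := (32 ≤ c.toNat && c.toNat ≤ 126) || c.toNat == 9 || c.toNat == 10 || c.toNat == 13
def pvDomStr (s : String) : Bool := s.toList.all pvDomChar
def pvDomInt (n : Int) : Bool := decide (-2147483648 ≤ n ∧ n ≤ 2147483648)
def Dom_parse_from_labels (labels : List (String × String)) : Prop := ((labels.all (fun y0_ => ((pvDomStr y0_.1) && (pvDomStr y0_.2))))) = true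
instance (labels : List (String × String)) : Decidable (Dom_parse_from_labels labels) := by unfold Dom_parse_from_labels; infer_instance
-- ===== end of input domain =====

-- B replaces A's single imperative loop (replace/split per GPU value, dict built by per-key
-- inserts) by two declarative comprehension passes plus a character-scan tokenizer for the
-- GPU values (objective: alternative decomposition, same cost).

-- ===== PORT A =====
-- A: one loop over the items; each GPU_ID value is cleaned with replace, split on "," and
-- appended id by id; every other pair is inserted into the other_labels dict.
def parse_from_labels (labels : List (String × String)) : List String × (List (String × String)) :=
  let st := labels.foldl
    (fun (acc : List String × PySem.Dict String String) kv =>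
      if "container_label_GPU_ID" == kv.1 then
        (((PySem.Str.split? (PySem.Str.replace kv.2 "\"" "") ",").getD []).foldl
            (fun gpu_ids id => if id ≠ "" then gpu_ids ++ [id] else gpu_ids) acc.1,
          acc.2)
      else
        (acc.1, acc.2.insert kv.1 kv.2))
    ([], PySem.Dict.empty)
  (st.1, st.2.items)

-- ===== PORT B =====
-- Source B's tokens(s): a single character scan with an (out, buf) state; '"' is skipped, ','
-- flushes a non-empty buf ('' .join(buf) over chars = String.ofList buf), anything else extends buf.
-- the loop body of Source B's tokens: skip '"', flush on ',', else extend buf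
def pvScanStep (st : List String × List Char) (ch : Char) : List String × List Char :=
  if ch == '"' then st
  else if ch == ',' then (if st.2.isEmpty then st.1 else st.1 ++ [String.ofList st.2], ([] : List Char))
  else (st.1, st.2 ++ [ch])

-- the final 'if buf: out.append(''.join(buf))' of Source B's tokens
def pvFlush (st : List String × List Char) : List String :=
  if st.2.isEmpty then st.1 else st.1 ++ [String.ofList st.2]

def pvTokScan (s : String) : List String :=
  pvFlush (s.toList.foldl pvScanStep ([], []))

-- Source B: gpu_ids is a nested list comprehension over the items (tokens of each GPU_ID value),
-- other_labels a dict comprehension over the items keeping the non-GPU_ID pairs.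
def parse_from_labels_alt (labels : List (String × String)) : List String × (List (String × String)) :=
  (labels.flatMap (fun kv => if kv.1 == "container_label_GPU_ID" then pvTokScan kv.2 else []),
   (PySem.Dict.ofList (labels.filter (fun kv => !(kv.1 == "container_label_GPU_ID")))).items)

-- ===== PRECONDITION & SPEC =====
def Spec_parse_from_labels (labels : List (String × String)) (out : List String × (List (String × String))) : Prop := out = parse_from_labels_alt labels
instance (labels : List (String × String)) (out : List String × (List (String × String))) : Decidable (Spec_parse_from_labels labels out) := by unfold Spec_parse_from_labels; infer_instance

-- ===== CLAIM (what is proved, stated in full; the proofs are below) =====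
def Claim_equal_parse_from_labels : Prop := ∀ (labels : List (String × String)), Dom_parse_from_labels labels → Spec_parse_from_labels labels (parse_from_labels labels)

-- ===== LEMMAS AND PROOFS =====

-- the ids A extracts from one GPU_ID value (shorthand for the proofs only)
def pvIds (v : String) : List String :=
  ((PySem.Str.split? (PySem.Str.replace v "\"" "") ",").getD []).filter (fun x => x ≠ "")

lemma pv_inner_foldl (s2 : List String) (g : List String) :
    s2.foldl (fun gpu_ids id => if id ≠ "" then gpu_ids ++ [id] else gpu_ids) g
      = g ++ s2.filter (fun x => x ≠ "") := by
  induction s2 generalizing g with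
  | nil => simp
  | cons x xs ih =>
    simp only [List.foldl_cons]
    by_cases hx : x = ""
    · rw [if_neg (by simp [hx]), ih, List.filter_cons, if_neg (by simp [hx])]
    · rw [if_pos hx, ih, List.filter_cons, if_pos (by simp [hx])]
      simp

-- A's single pass, characterised: gpu part from the GPU_ID entries, dict part a fold over the rest
lemma pv_foldA (l : List (String × String)) (g : List String) (d : PySem.Dict String String) :
    l.foldl
      (fun (acc : List String × PySem.Dict String String) kv =>
        if "container_label_GPU_ID" == kv.1 then
          (((PySem.Str.split? (PySem.Str.replace kv.2 "\"" "") ",").getD []).foldl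
              (fun gpu_ids id => if id ≠ "" then gpu_ids ++ [id] else gpu_ids) acc.1,
            acc.2)
        else
          (acc.1, acc.2.insert kv.1 kv.2)) (g, d)
      = (g ++ (l.filter (fun kv => "container_label_GPU_ID" == kv.1)).flatMap (fun kv => pvIds kv.2),
         (l.filter (fun kv => !("container_label_GPU_ID" == kv.1))).foldl
           (fun d kv => d.insert kv.1 kv.2) d) := by
  induction l generalizing g d with
  | nil => simp
  | cons kv rest ih =>
    simp only [List.foldl_cons]
    by_cases h : ("container_label_GPU_ID" == kv.1) = true
    · rw [if_pos h, pv_inner_foldl, ih, List.filter_cons, if_pos h, List.filter_cons,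
        if_neg (by simp [h]), List.flatMap_cons]
      simp only [pvIds, List.append_assoc]
    · rw [if_neg h, ih, List.filter_cons, if_neg h, List.filter_cons, if_pos (by simp [h]),
        List.foldl_cons]

-- a plain comma splitter: (first piece, remaining pieces)
def pvCs : List Char → List Char × List (List Char)
  | [] => ([], [])
  | c :: t =>
    let p := pvCs t
    if c = ',' then ([], p.1 :: p.2) else (c :: p.1, p.2)

-- the same splitter with '"' skipped inline (what Source B's scan computes piece-wise)
def pvCsq : List Char → List Char × List (List Char)
  | [] => ([], [])
  | c :: t =>
    let p := pvCsq t
    if c = '"' then p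
    else if c = ',' then ([], p.1 :: p.2)
    else (c :: p.1, p.2)

lemma pv_replace_go (fuel : Nat) (l acc : List Char) (h : l.length ≤ fuel) :
    PySem.Chars.replace.go ['"'] [] fuel l acc
      = acc.reverse ++ l.filter (fun c => !(c == '"')) := by
  induction fuel generalizing l acc with
  | zero =>
    have hl : l = [] := List.eq_nil_of_length_eq_zero (Nat.le_zero.mp h)
    subst hl; simp [PySem.Chars.replace.go]
  | succ n ih =>
    cases l with
    | nil => simp [PySem.Chars.replace.go]
    | cons c t =>
      simp only [PySem.Chars.replace.go]
      by_cases hc : c = '"'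
      · rw [if_pos (by simp [hc, List.isPrefixOf])]
        rw [ih _ _ (by simpa using Nat.le_of_succ_le_succ (by simpa using h))]
        simp [hc]
      · rw [if_neg (by simp [List.isPrefixOf, Ne.symm hc])]
        rw [ih _ _ (by simpa using Nat.le_of_succ_le_succ (by simpa using h))]
        simp [hc]

lemma pv_replace (l : List Char) :
    PySem.Chars.replace l ['"'] [] = l.filter (fun c => !(c == '"')) := by
  simp [PySem.Chars.replace, pv_replace_go l.length l []]

lemma pv_splitOn_go (fuel : Nat) (l cur : List Char) (acc : List (List Char))
    (h : l.length ≤ fuel) :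
    PySem.Chars.splitOn.go [','] fuel l cur acc
      = acc.reverse ++ (cur.reverse ++ (pvCs l).1) :: (pvCs l).2 := by
  induction fuel generalizing l cur acc with
  | zero =>
    have hl : l = [] := List.eq_nil_of_length_eq_zero (Nat.le_zero.mp h)
    subst hl; simp [PySem.Chars.splitOn.go, pvCs]
  | succ n ih =>
    cases l with
    | nil => simp [PySem.Chars.splitOn.go, pvCs]
    | cons c t =>
      simp only [PySem.Chars.splitOn.go]
      by_cases hc : c = ','
      · rw [if_pos (by simp [hc, List.isPrefixOf])]
        rw [ih _ _ _ (by simpa using Nat.le_of_succ_le_succ (by simpa using h))]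
        simp [pvCs, hc]
      · rw [if_neg (by simp [List.isPrefixOf, Ne.symm hc])]
        rw [ih _ _ _ (by simpa using Nat.le_of_succ_le_succ (by simpa using h))]
        simp [pvCs, hc]

lemma pv_splitOn (l : List Char) :
    PySem.Chars.splitOn l [','] = (pvCs l).1 :: (pvCs l).2 := by
  simp [PySem.Chars.splitOn, pv_splitOn_go (l.length + 1) l [] [] (Nat.le_succ _)]

lemma pv_cs_filter (l : List Char) :
    pvCs (l.filter (fun c => !(c == '"'))) = pvCsq l := by
  induction l with
  | nil => rfl
  | cons c t ih =>
    by_cases hc : c = '"'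
    · simp [hc, pvCsq, ih]
    · by_cases hc2 : c = ','
      · simp [hc2, pvCs, pvCsq, ih]
      · simp [hc, hc2, pvCs, pvCsq, ih]

-- Source B's scan, characterised against the quote-skipping comma splitter
lemma pv_scan (l : List Char) (out : List String) (buf : List Char) :
    pvFlush (l.foldl pvScanStep (out, buf))
      = out ++ (((buf ++ (pvCsq l).1) :: (pvCsq l).2).filter (fun x => !x.isEmpty)).map String.ofList := by
  induction l generalizing out buf with
  | nil => cases buf <;> simp [pvFlush, pvCsq]
  | cons c t ih =>
    simp only [List.foldl_cons]
    by_cases hc : c = '"'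
    · have h1 : (c == '"') = true := by simp [hc]
      simp only [pvScanStep, h1, if_true]
      rw [ih out buf]
      simp [pvCsq, hc]
    · have h1 : (c == '"') = false := by simp [hc]
      by_cases hc2 : c = ','
      · have h2 : (c == ',') = true := by simp [hc2]
        simp only [pvScanStep, h1, Bool.false_eq_true, if_false, h2, if_true]
        rw [ih _ []]
        cases buf with
        | nil => simp [pvCsq, hc2]
        | cons b bs => simp [pvCsq, hc2]
      · have h2 : (c == ',') = false := by simp [hc2]
        simp only [pvScanStep, h1, h2, Bool.false_eq_true, if_false]
        rw [ih out (buf ++ [c])]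
        simp [pvCsq, hc, hc2]

-- the two value-processing pipelines agree
lemma pv_tok_eq_ids (v : String) : pvTokScan v = pvIds v := by
  have hsplit : PySem.Str.split? (PySem.Str.replace v "\"" "") ","
      = some (List.map String.ofList ((pvCsq v.toList).1 :: (pvCsq v.toList).2)) := by
    rw [PySem.Str.split?, PySem.Str.toList_replace,
      show ("\"" : String).toList = ['"'] from by decide,
      show ("" : String).toList = [] from by decide,
      show ("," : String).toList = [','] from by decide,
      pv_replace]
    rw [PySem.Chars.split?]
    simp only [List.isEmpty_cons, Bool.false_eq_true, if_false]
    rw [pv_splitOn, pv_cs_filter]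
    rfl
  unfold pvIds
  rw [hsplit]
  unfold pvTokScan
  rw [pv_scan v.toList [] []]
  simp only [Option.getD_some, List.nil_append, List.filter_map]
  have hpp : ((fun x => decide (x ≠ "")) ∘ String.ofList)
      = fun cs : List Char => !cs.isEmpty := by
    funext cs
    cases cs with
    | nil => simp
    | cons c t => simp
  rw [hpp]

-- Source B's gpu comprehension, characterised
lemma pv_flatMap_if (l : List (String × String)) :
    l.flatMap (fun kv => if kv.1 == "container_label_GPU_ID" then pvTokScan kv.2 else [])
      = (l.filter (fun kv => kv.1 == "container_label_GPU_ID")).flatMap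
          (fun kv => pvTokScan kv.2) := by
  induction l with
  | nil => rfl
  | cons kv rest ih =>
    rw [List.flatMap_cons, ih, List.filter_cons]
    by_cases h : (kv.1 == "container_label_GPU_ID") = true
    · rw [if_pos h, if_pos h, List.flatMap_cons]
    · rw [if_neg h, if_neg h, List.nil_append]

-- ===== VERDICT (by name: the statement is the Claim_ definition above) =====
theorem parse_from_labels_spec : Claim_equal_parse_from_labels := by
  intro labels _
  show _ = _
  unfold parse_from_labels parse_from_labels_alt
  rw [pv_foldA, pv_flatMap_if]
  have hbeq : ∀ a b : String, (a == b) = (b == a) := by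
    intro a b
    by_cases h : a = b
    · subst h; rfl
    · simp [h, Ne.symm h]
  have hpred : (fun (kv : String × String) => ("container_label_GPU_ID" == kv.1))
      = (fun kv => (kv.1 == "container_label_GPU_ID")) := by
    funext kv; exact hbeq _ _
  have hpred2 : (fun (kv : String × String) => !("container_label_GPU_ID" == kv.1))
      = (fun kv => !(kv.1 == "container_label_GPU_ID")) := by
    funext kv; rw [hbeq]
  simp only [hpred, hpred2, pv_tok_eq_ids, List.nil_append]
  rfl
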